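-- pv_equiv track=rewrite | github.com/k4pran/Advent-Of-Code-2023 | day23/day23-2.py | find_junctions_and_deadends
-- ===== SOURCE A (Python) =====
-- def get_neighbours(grid, loc, previous_loc=None):
--     row, col = loc
--     grid_height = len(grid)
--     grid_width = len(grid[0])
--
--     neighbours = []
--
--     for r, c in [(row - 1, col), (row + 1, col), (row, col - 1), (row, col + 1)]:
--         if 0 <= r < grid_height and 0 <= c < grid_width and grid[r][c] != "#":
--             if previous_loc != (r, c) or previous_loc == None:
--                 neighbours.append((r, c))
--
--     return neighbours
--
-- def find_junctions_and_deadends(grid):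
--     junctions = []
--     dead_ends = []
--     for row in range(len(grid)):
--         for col in range(len(grid[0])):
--             if grid[row][col] == "#":
--                 continue
--             neighbours = get_neighbours(grid, (row, col))
--             if len(neighbours) == 0:
--                 dead_ends.append((row, col))
--             elif len(neighbours) > 1:
--                 junctions.append((row, col))
--     return junctions, dead_ends
-- ===== SOURCE B (Python) =====
-- def find_junctions_and_deadends(grid):
--     h = len(grid)
--     w = len(grid[0]) if grid else 0
--     deg = {}
--     for r in range(h):
--         for c in range(w):
--             if grid[r][c] == "#":
--                 continue
--             if (r, c) not in deg:
--                 deg[(r, c)] = 0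
--             if c + 1 < w and grid[r][c + 1] != "#":
--                 deg[(r, c)] += 1
--                 deg[(r, c + 1)] = deg.get((r, c + 1), 0) + 1
--             if r + 1 < h and grid[r + 1][c] != "#":
--                 deg[(r, c)] += 1
--                 deg[(r + 1, c)] = deg.get((r + 1, c), 0) + 1
--     junctions = []
--     dead_ends = []
--     for r in range(h):
--         for c in range(w):
--             d = deg.get((r, c))
--             if d is None:
--                 continue
--             if d == 0:
--                 dead_ends.append((r, c))
--             elif d > 1:
--                 junctions.append((r, c))
--     return junctions, dead_ends
-- ===== Notes on version B (the rewrite author's own statement) =====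
-- stated objective: alternative
-- what changed: Replaces the per-cell probing of all four neighbours (get_neighbours with bounds checks) by a two-pass edge-based degree table: a first pass looks only at each open cell's right and down neighbour and increments a dict-based degree counter for both endpoints of every edge, and a second row-major pass classifies each open cell by its tabulated degree (0 = dead end, >1 = junction).
import Mathlib
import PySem

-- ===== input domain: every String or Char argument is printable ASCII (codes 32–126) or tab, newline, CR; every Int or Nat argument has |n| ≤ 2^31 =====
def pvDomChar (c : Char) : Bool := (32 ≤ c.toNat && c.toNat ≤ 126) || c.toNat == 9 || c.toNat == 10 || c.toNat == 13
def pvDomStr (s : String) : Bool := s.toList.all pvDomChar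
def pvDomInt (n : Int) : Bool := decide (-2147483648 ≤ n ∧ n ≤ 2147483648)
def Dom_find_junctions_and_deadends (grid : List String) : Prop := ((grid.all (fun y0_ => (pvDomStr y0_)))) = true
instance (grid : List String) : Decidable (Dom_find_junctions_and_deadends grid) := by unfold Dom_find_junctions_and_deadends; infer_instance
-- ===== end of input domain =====

-- B replaces A's per-cell four-neighbour probing by a two-pass edge-based degree table
-- (first pass counts right/down adjacencies into a dict, second pass classifies by degree);
-- same asymptotic cost, alternative algorithm.

-- ===== PORT A =====
-- grid[r][c] as both Pythons use it (default never reached on admitted in-bounds accesses)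
def pvCell (grid : List String) (r c : Int) : Char :=
  (PySem.Str.pyGet? ((PySem.List.pyGet? grid r).getD "") c).getD '#'

-- len(grid[0]), and 0 for the empty grid: ports B's `len(grid[0]) if grid else 0` exactly;
-- A only ever evaluates len(grid[0]) with grid nonempty, where the two agree
def pvW (grid : List String) : Int := PySem.Str.len ((PySem.List.pyGet? grid 0).getD "")

def get_neighbours (grid : List String) (loc : Int × Int) (previous_loc : Option (Int × Int)) :
    List (Int × Int) :=
  let row := loc.1
  let col := loc.2
  let grid_height : Int := grid.length
  let grid_width : Int := pvW grid
  [(row - 1, col), (row + 1, col), (row, col - 1), (row, col + 1)].foldl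
    (fun ns rc =>
      if 0 ≤ rc.1 ∧ rc.1 < grid_height ∧ 0 ≤ rc.2 ∧ rc.2 < grid_width ∧
          pvCell grid rc.1 rc.2 ≠ '#' then
        if previous_loc ≠ some rc ∨ previous_loc = none then ns ++ [rc] else ns
      else ns) []

def find_junctions_and_deadends (grid : List String) :
    (List (Int × Int)) × (List (Int × Int)) :=
  (PySem.List.pyRange 0 grid.length 1).foldl
    (fun acc row =>
      (PySem.List.pyRange 0 (pvW grid) 1).foldl
        (fun acc col =>
          if pvCell grid row col = '#' then acc
          else
            let neighbours := get_neighbours grid (row, col) none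
            if neighbours.length = 0 then (acc.1, acc.2 ++ [(row, col)])
            else if neighbours.length > 1 then (acc.1 ++ [(row, col)], acc.2)
            else acc)
        acc)
    (([], []) : (List (Int × Int)) × (List (Int × Int)))

-- ===== PORT B =====
-- body of B's first-pass loop for one cell (r, c)
def pvStepB (grid : List String) (d : PySem.Dict (Int × Int) Int) (r c : Int) :
    PySem.Dict (Int × Int) Int :=
  if pvCell grid r c = '#' then d
  else
    let d := if d.contains (r, c) then d else d.insert (r, c) 0
    let d :=
      if c + 1 < pvW grid ∧ pvCell grid r (c + 1) ≠ '#' then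
        let d := d.insert (r, c) (d.getD (r, c) 0 + 1)
        d.insert (r, c + 1) (d.getD (r, c + 1) 0 + 1)
      else d
    if r + 1 < (grid.length : Int) ∧ pvCell grid (r + 1) c ≠ '#' then
      let d := d.insert (r, c) (d.getD (r, c) 0 + 1)
      d.insert (r + 1, c) (d.getD (r + 1, c) 0 + 1)
    else d

def find_junctions_and_deadends_alt (grid : List String) :
    (List (Int × Int)) × (List (Int × Int)) :=
  let deg :=
    (PySem.List.pyRange 0 grid.length 1).foldl
      (fun d r =>
        (PySem.List.pyRange 0 (pvW grid) 1).foldl (fun d c => pvStepB grid d r c) d)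
      PySem.Dict.empty
  (PySem.List.pyRange 0 grid.length 1).foldl
    (fun acc r =>
      (PySem.List.pyRange 0 (pvW grid) 1).foldl
        (fun acc c =>
          match deg.get? (r, c) with
          | none => acc
          | some dv =>
            if dv = 0 then (acc.1, acc.2 ++ [(r, c)])
            else if dv > 1 then (acc.1 ++ [(r, c)], acc.2)
            else acc)
        acc)
    (([], []) : (List (Int × Int)) × (List (Int × Int)))

-- ===== PRECONDITION & SPEC =====
-- Pre_ excludes exactly the inputs where Python A raises: grids with a row shorter than the
-- first row (grid[r][c] raises an IndexError for some c < len(grid[0])).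
def Pre_find_junctions_and_deadends (grid : List String) : Prop :=
  ∀ s ∈ grid, pvW grid ≤ PySem.Str.len s
instance (grid : List String) : Decidable (Pre_find_junctions_and_deadends grid) := by
  unfold Pre_find_junctions_and_deadends; infer_instance

def pvWitness_find_junctions_and_deadends : List String := [".#.", "...", "#.#"]

def Spec_find_junctions_and_deadends (grid : List String)
    (out : (List (Int × Int)) × (List (Int × Int))) : Prop :=
  out = find_junctions_and_deadends_alt grid
instance (grid : List String) (out : (List (Int × Int)) × (List (Int × Int))) :
    Decidable (Spec_find_junctions_and_deadends grid out) := by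
  unfold Spec_find_junctions_and_deadends; infer_instance

-- ===== CLAIM (what is proved, stated in full; the proofs are below) =====
def Claim_equal_find_junctions_and_deadends : Prop :=
  ∀ (grid : List String), Dom_find_junctions_and_deadends grid →
    Pre_find_junctions_and_deadends grid →
      Spec_find_junctions_and_deadends grid (find_junctions_and_deadends grid)

-- ===== LEMMAS AND PROOFS =====

-- cell (r, c) is inside the h×w box and not a wall
abbrev pvOpen (grid : List String) (r c : Int) : Prop :=
  0 ≤ r ∧ r < (grid.length : Int) ∧ 0 ≤ c ∧ c < pvW grid ∧ pvCell grid r c ≠ '#'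

-- number of open 4-neighbours, in A's probing order
def pvN (grid : List String) (r c : Int) : Int :=
  (if pvOpen grid (r - 1) c then 1 else 0) + (if pvOpen grid (r + 1) c then 1 else 0) +
  (if pvOpen grid r (c - 1) then 1 else 0) + (if pvOpen grid r (c + 1) then 1 else 0)

-- degree contributed to cell p by the already-processed prefix `done` of the row-major cell list
def pvE (grid : List String) (done : List (Int × Int)) (p : Int × Int) : Int :=
  (if p ∈ done ∧ pvOpen grid p.1 p.2 then
      (if pvOpen grid p.1 (p.2 + 1) then 1 else 0) +
      (if pvOpen grid (p.1 + 1) p.2 then 1 else 0)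
    else 0) +
  (if (p.1, p.2 - 1) ∈ done ∧ pvOpen grid p.1 (p.2 - 1) ∧ pvOpen grid p.1 p.2 then 1 else 0) +
  (if (p.1 - 1, p.2) ∈ done ∧ pvOpen grid (p.1 - 1) p.2 ∧ pvOpen grid p.1 p.2 then 1 else 0)

-- p has an entry in the degree dict after processing `done`
abbrev pvM (grid : List String) (done : List (Int × Int)) (p : Int × Int) : Prop :=
  pvOpen grid p.1 p.2 ∧
    (p ∈ done ∨ ((p.1, p.2 - 1) ∈ done ∧ pvOpen grid p.1 (p.2 - 1)) ∨
      ((p.1 - 1, p.2) ∈ done ∧ pvOpen grid (p.1 - 1) p.2))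

def pvInv (grid : List String) (done : List (Int × Int)) (d : PySem.Dict (Int × Int) Int) : Prop :=
  ∀ p, d.get? p = if pvM grid done p then some (pvE grid done p) else none

def pvCells (grid : List String) : List (Int × Int) :=
  (PySem.List.pyRange 0 grid.length 1).flatMap
    (fun r => (PySem.List.pyRange 0 (pvW grid) 1).map (fun c => (r, c)))

lemma pv_foldl_foldl {σ : Type} (l1 l2 : List Int) (f : σ → Int → Int → σ) (init : σ) :
    l1.foldl (fun s a => l2.foldl (fun s b => f s a b) s) init
      = (l1.flatMap (fun a => l2.map (fun b => (a, b)))).foldl (fun s p => f s p.1 p.2) init := by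
  induction l1 generalizing init with
  | nil => simp
  | cons a t ih => simp [List.foldl_append, List.foldl_map, ih]

lemma pv_mem_pvCells (grid : List String) (r c : Int) :
    (r, c) ∈ pvCells grid ↔ 0 ≤ r ∧ r < (grid.length : Int) ∧ 0 ≤ c ∧ c < pvW grid := by
  simp only [pvCells, List.mem_flatMap, List.mem_map, PySem.List.mem_pyRange_one]
  constructor
  · rintro ⟨a, ⟨h1, h2⟩, b, ⟨h3, h4⟩, h5⟩
    obtain ⟨rfl, rfl⟩ : a = r ∧ b = c := by
      constructor <;> [exact congrArg Prod.fst h5; exact congrArg Prod.snd h5]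
    exact ⟨h1, h2, h3, h4⟩
  · rintro ⟨h1, h2, h3, h4⟩
    exact ⟨r, ⟨h1, h2⟩, c, ⟨h3, h4⟩, rfl⟩

lemma pv_nodup_pvCells (grid : List String) : (pvCells grid).Nodup := by
  have : pvCells grid
      = (PySem.List.pyRange 0 grid.length 1) ×ˢ (PySem.List.pyRange 0 (pvW grid) 1) := rfl
  rw [this]
  exact List.Nodup.product (PySem.List.nodup_pyRange_one _ _) (PySem.List.nodup_pyRange_one _ _)

lemma pvE_eq_zero_of_not_M (grid : List String) (done : List (Int × Int)) (p : Int × Int)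
    (h : ¬ pvM grid done p) : pvE grid done p = 0 := by
  unfold pvE
  rw [if_neg (fun hc => h ⟨hc.2, Or.inl hc.1⟩),
      if_neg (fun hc => h ⟨hc.2.2, Or.inr (Or.inl ⟨hc.1, hc.2.1⟩)⟩),
      if_neg (fun hc => h ⟨hc.2.2, Or.inr (Or.inr ⟨hc.1, hc.2.1⟩)⟩)]
  norm_num

lemma pv_getD_of_inv (grid : List String) (done : List (Int × Int))
    (d : PySem.Dict (Int × Int) Int) (hd : pvInv grid done d) (p : Int × Int) :
    d.getD p 0 = pvE grid done p := by
  rw [PySem.Dict.getD_eq_get?_getD, hd p]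
  by_cases h : pvM grid done p
  · rw [if_pos h]; rfl
  · rw [if_neg h, pvE_eq_zero_of_not_M grid done p h]; rfl

lemma pv_contains_of_inv (grid : List String) (done : List (Int × Int))
    (d : PySem.Dict (Int × Int) Int) (hd : pvInv grid done d) (p : Int × Int) :
    d.contains p = decide (pvM grid done p) := by
  rw [PySem.Dict.contains_eq_isSome_get?, hd p]
  by_cases h : pvM grid done p
  · rw [if_pos h]; simp [h]
  · rw [if_neg h]; simp [h]


lemma pv_ne_self_sub_one (a : Int) : ¬ (a - 1 = a) := by omega
lemma pv_ne_self_add_one (a : Int) : ¬ (a + 1 = a) := by omega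

-- appending a CLOSED cell to `done` changes nothing
lemma pvM_snoc_closed (grid : List String) (done : List (Int × Int)) (qr qc : Int)
    (hoq : ¬ pvOpen grid qr qc) (p : Int × Int) :
    pvM grid (done ++ [(qr, qc)]) p ↔ pvM grid done p := by
  obtain ⟨pr, pc⟩ := p
  simp only [pvM, List.mem_append, List.mem_singleton, Prod.mk.injEq]
  constructor
  · rintro ⟨hop, (hm | ⟨rfl, rfl⟩) | ⟨(hm | ⟨rfl, hce⟩), ho2⟩ | ⟨(hm | ⟨hre, rfl⟩), ho3⟩⟩
    · exact ⟨hop, Or.inl hm⟩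
    · exact absurd hop hoq
    · exact ⟨hop, Or.inr (Or.inl ⟨hm, ho2⟩)⟩
    · rw [hce] at ho2; exact absurd ho2 hoq
    · exact ⟨hop, Or.inr (Or.inr ⟨hm, ho3⟩)⟩
    · rw [hre] at ho3; exact absurd ho3 hoq
  · rintro ⟨hop, hm | ⟨hm, ho2⟩ | ⟨hm, ho3⟩⟩
    · exact ⟨hop, Or.inl (Or.inl hm)⟩
    · exact ⟨hop, Or.inr (Or.inl ⟨Or.inl hm, ho2⟩)⟩
    · exact ⟨hop, Or.inr (Or.inr ⟨Or.inl hm, ho3⟩)⟩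

lemma pvE_snoc_closed (grid : List String) (done : List (Int × Int)) (qr qc : Int)
    (hoq : ¬ pvOpen grid qr qc) (p : Int × Int) :
    pvE grid (done ++ [(qr, qc)]) p = pvE grid done p := by
  obtain ⟨pr, pc⟩ := p
  have t1 : ((pr, pc) ∈ done ++ [(qr, qc)] ∧ pvOpen grid pr pc)
      ↔ ((pr, pc) ∈ done ∧ pvOpen grid pr pc) := by
    constructor
    · rintro ⟨hm, hop⟩
      rcases List.mem_append.mp hm with hm | hm
      · exact ⟨hm, hop⟩
      · obtain ⟨rfl, rfl⟩ : pr = qr ∧ pc = qc := by simpa using hm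
        exact absurd hop hoq
    · exact fun ⟨hm, hop⟩ => ⟨List.mem_append.mpr (Or.inl hm), hop⟩
  have t2 : ((pr, pc - 1) ∈ done ++ [(qr, qc)] ∧ pvOpen grid pr (pc - 1) ∧ pvOpen grid pr pc)
      ↔ ((pr, pc - 1) ∈ done ∧ pvOpen grid pr (pc - 1) ∧ pvOpen grid pr pc) := by
    constructor
    · rintro ⟨hm, ho2, hop⟩
      rcases List.mem_append.mp hm with hm | hm
      · exact ⟨hm, ho2, hop⟩
      · obtain ⟨rfl, hce⟩ : pr = qr ∧ pc - 1 = qc := by simpa using hm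
        rw [hce] at ho2; exact absurd ho2 hoq
    · exact fun ⟨hm, ho2, hop⟩ => ⟨List.mem_append.mpr (Or.inl hm), ho2, hop⟩
  have t3 : ((pr - 1, pc) ∈ done ++ [(qr, qc)] ∧ pvOpen grid (pr - 1) pc ∧ pvOpen grid pr pc)
      ↔ ((pr - 1, pc) ∈ done ∧ pvOpen grid (pr - 1) pc ∧ pvOpen grid pr pc) := by
    constructor
    · rintro ⟨hm, ho3, hop⟩
      rcases List.mem_append.mp hm with hm | hm
      · exact ⟨hm, ho3, hop⟩
      · obtain ⟨hre, rfl⟩ : pr - 1 = qr ∧ pc = qc := by simpa using hm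
        rw [hre] at ho3; exact absurd ho3 hoq
    · exact fun ⟨hm, ho3, hop⟩ => ⟨List.mem_append.mpr (Or.inl hm), ho3, hop⟩
  unfold pvE
  simp only [t1, t2, t3]

lemma pvE_snoc_self (grid : List String) (done : List (Int × Int)) (qr qc : Int)
    (hnd : (qr, qc) ∉ done) (hoq : pvOpen grid qr qc) :
    pvE grid (done ++ [(qr, qc)]) (qr, qc)
      = pvE grid done (qr, qc) + ((if pvOpen grid qr (qc + 1) then 1 else 0)
        + (if pvOpen grid (qr + 1) qc then 1 else 0)) := by
  have t1 : ((qr, qc) ∈ done ++ [(qr, qc)] ∧ pvOpen grid qr qc) ↔ True :=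
    iff_true_intro ⟨List.mem_append.mpr (Or.inr (by simp)), hoq⟩
  have t1' : ((qr, qc) ∈ done ∧ pvOpen grid qr qc) ↔ False :=
    iff_false_intro (fun h => hnd h.1)
  have t2 : (qr, qc - 1) ∈ done ++ [(qr, qc)] ↔ (qr, qc - 1) ∈ done := by
    simp [pv_ne_self_sub_one]
  have t3 : (qr - 1, qc) ∈ done ++ [(qr, qc)] ↔ (qr - 1, qc) ∈ done := by
    simp [pv_ne_self_sub_one]
  unfold pvE
  simp only [t1, t1', t2, t3, if_true, if_false]
  ring

lemma pvE_snoc_right (grid : List String) (done : List (Int × Int)) (qr qc : Int)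
    (hnd : (qr, qc) ∉ done) (hoq : pvOpen grid qr qc) (hor : pvOpen grid qr (qc + 1)) :
    pvE grid (done ++ [(qr, qc)]) (qr, qc + 1) = pvE grid done (qr, qc + 1) + 1 := by
  have e : qc + 1 - 1 = qc := by ring
  have t1 : (qr, qc + 1) ∈ done ++ [(qr, qc)] ↔ (qr, qc + 1) ∈ done := by
    simp [pv_ne_self_add_one]
  have t2 : ((qr, qc + 1 - 1) ∈ done ++ [(qr, qc)] ∧ pvOpen grid qr (qc + 1 - 1)
      ∧ pvOpen grid qr (qc + 1)) ↔ True := by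
    rw [e]; exact iff_true_intro ⟨List.mem_append.mpr (Or.inr (by simp)), hoq, hor⟩
  have t2' : ((qr, qc + 1 - 1) ∈ done ∧ pvOpen grid qr (qc + 1 - 1)
      ∧ pvOpen grid qr (qc + 1)) ↔ False := by
    rw [e]; exact iff_false_intro (fun h => hnd h.1)
  have t3 : (qr - 1, qc + 1) ∈ done ++ [(qr, qc)] ↔ (qr - 1, qc + 1) ∈ done := by
    simp [pv_ne_self_sub_one, pv_ne_self_add_one]
  unfold pvE
  simp only [t1, t2, t2', t3, if_true, if_false]
  ring

lemma pvM_snoc_right (grid : List String) (done : List (Int × Int)) (qr qc : Int)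
    (hoq : pvOpen grid qr qc) (hor : pvOpen grid qr (qc + 1)) :
    pvM grid (done ++ [(qr, qc)]) (qr, qc + 1) := by
  refine ⟨hor, Or.inr (Or.inl ⟨?_, ?_⟩)⟩
  · exact List.mem_append.mpr (Or.inr (by simp))
  · rw [show qc + 1 - 1 = qc from by ring]; exact hoq

lemma pvE_snoc_down (grid : List String) (done : List (Int × Int)) (qr qc : Int)
    (hnd : (qr, qc) ∉ done) (hoq : pvOpen grid qr qc) (hod : pvOpen grid (qr + 1) qc) :
    pvE grid (done ++ [(qr, qc)]) (qr + 1, qc) = pvE grid done (qr + 1, qc) + 1 := by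
  have e : qr + 1 - 1 = qr := by ring
  have t1 : (qr + 1, qc) ∈ done ++ [(qr, qc)] ↔ (qr + 1, qc) ∈ done := by
    simp [pv_ne_self_add_one]
  have t2 : (qr + 1, qc - 1) ∈ done ++ [(qr, qc)] ↔ (qr + 1, qc - 1) ∈ done := by
    simp [pv_ne_self_add_one, pv_ne_self_sub_one]
  have t3 : ((qr + 1 - 1, qc) ∈ done ++ [(qr, qc)] ∧ pvOpen grid (qr + 1 - 1) qc
      ∧ pvOpen grid (qr + 1) qc) ↔ True := by
    rw [e]; exact iff_true_intro ⟨List.mem_append.mpr (Or.inr (by simp)), hoq, hod⟩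
  have t3' : ((qr + 1 - 1, qc) ∈ done ∧ pvOpen grid (qr + 1 - 1) qc
      ∧ pvOpen grid (qr + 1) qc) ↔ False := by
    rw [e]; exact iff_false_intro (fun h => hnd h.1)
  unfold pvE
  simp only [t1, t2, t3, t3', if_true, if_false]
  ring

lemma pvM_snoc_down (grid : List String) (done : List (Int × Int)) (qr qc : Int)
    (hoq : pvOpen grid qr qc) (hod : pvOpen grid (qr + 1) qc) :
    pvM grid (done ++ [(qr, qc)]) (qr + 1, qc) := by
  refine ⟨hod, Or.inr (Or.inr ⟨?_, ?_⟩)⟩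
  · exact List.mem_append.mpr (Or.inr (by simp))
  · rw [show qr + 1 - 1 = qr from by ring]; exact hoq

lemma pvM_snoc_other (grid : List String) (done : List (Int × Int)) (qr qc : Int)
    (p : Int × Int) (hp : p ≠ (qr, qc))
    (hr : p = (qr, qc + 1) → ¬ pvOpen grid p.1 p.2)
    (hdn : p = (qr + 1, qc) → ¬ pvOpen grid p.1 p.2) :
    pvM grid (done ++ [(qr, qc)]) p ↔ pvM grid done p := by
  obtain ⟨pr, pc⟩ := p
  by_cases hop : pvOpen grid pr pc
  · have hr' : ¬ (pr = qr ∧ pc - 1 = qc) := by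
      rintro ⟨rfl, hce⟩; exact hr (by rw [← hce]; simp [show pc - 1 + 1 = pc from by ring]) hop
    have hd' : ¬ (pr - 1 = qr ∧ pc = qc) := by
      rintro ⟨hre, rfl⟩; exact hdn (by rw [← hre]; simp [show pr - 1 + 1 = pr from by ring]) hop
    have hp' : ¬ (pr = qr ∧ pc = qc) := by rintro ⟨rfl, rfl⟩; exact hp rfl
    simp only [pvM, List.mem_append, List.mem_singleton, Prod.mk.injEq, hr', hd', hp',
      or_false]
  · constructor
    · rintro ⟨hop', _⟩; exact absurd hop' hop
    · rintro ⟨hop', _⟩; exact absurd hop' hop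

lemma pvE_snoc_other (grid : List String) (done : List (Int × Int)) (qr qc : Int)
    (p : Int × Int) (hp : p ≠ (qr, qc))
    (hr : p = (qr, qc + 1) → ¬ pvOpen grid p.1 p.2)
    (hdn : p = (qr + 1, qc) → ¬ pvOpen grid p.1 p.2) :
    pvE grid (done ++ [(qr, qc)]) p = pvE grid done p := by
  obtain ⟨pr, pc⟩ := p
  by_cases hop : pvOpen grid pr pc
  · have hr' : ¬ (pr = qr ∧ pc - 1 = qc) := by
      rintro ⟨rfl, hce⟩; exact hr (by rw [← hce]; simp [show pc - 1 + 1 = pc from by ring]) hop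
    have hd' : ¬ (pr - 1 = qr ∧ pc = qc) := by
      rintro ⟨hre, rfl⟩; exact hdn (by rw [← hre]; simp [show pr - 1 + 1 = pr from by ring]) hop
    have hp' : ¬ (pr = qr ∧ pc = qc) := by rintro ⟨rfl, rfl⟩; exact hp rfl
    unfold pvE
    simp only [List.mem_append, List.mem_singleton, Prod.mk.injEq, hr', hd', hp', or_false]
  · unfold pvE
    rw [if_neg (fun hc => hop hc.2), if_neg (fun hc => hop hc.2.2),
      if_neg (fun hc => hop hc.2.2), if_neg (fun hc => hop hc.2),
      if_neg (fun hc => hop hc.2.2), if_neg (fun hc => hop hc.2.2)]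

lemma pv_step_inv (grid : List String) (done : List (Int × Int)) (qr qc : Int)
    (hq : 0 ≤ qr ∧ qr < (grid.length : Int) ∧ 0 ≤ qc ∧ qc < pvW grid)
    (hnd : (qr, qc) ∉ done) (d : PySem.Dict (Int × Int) Int) (hd : pvInv grid done d) :
    pvInv grid (done ++ [(qr, qc)]) (pvStepB grid d qr qc) := by
  have hne_rq : ((qr, qc + 1) : Int × Int) ≠ (qr, qc) := fun h =>
    pv_ne_self_add_one qc (congrArg Prod.snd h)
  have hne_dq : ((qr + 1, qc) : Int × Int) ≠ (qr, qc) := fun h =>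
    pv_ne_self_add_one qr (congrArg Prod.fst h)
  have hne_dr : ((qr + 1, qc) : Int × Int) ≠ (qr, qc + 1) := fun h =>
    pv_ne_self_add_one qr (congrArg Prod.fst h)
  by_cases hc : pvCell grid qr qc = '#'
  · have hoq : ¬ pvOpen grid qr qc := fun h => h.2.2.2.2 hc
    intro p
    unfold pvStepB
    rw [if_pos hc, hd p, pvE_snoc_closed grid done qr qc hoq p]
    by_cases hM : pvM grid done p
    · rw [if_pos hM, if_pos ((pvM_snoc_closed grid done qr qc hoq p).mpr hM)]
    · rw [if_neg hM, if_neg (fun h => hM ((pvM_snoc_closed grid done qr qc hoq p).mp h))]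
  · have hoq : pvOpen grid qr qc := ⟨hq.1, hq.2.1, hq.2.2.1, hq.2.2.2, hc⟩
    have hCr : (qc + 1 < pvW grid ∧ pvCell grid qr (qc + 1) ≠ '#') ↔ pvOpen grid qr (qc + 1) :=
      ⟨fun h => ⟨hq.1, hq.2.1, by omega, h.1, h.2⟩, fun h => ⟨h.2.2.2.1, h.2.2.2.2⟩⟩
    have hCd : (qr + 1 < (grid.length : Int) ∧ pvCell grid (qr + 1) qc ≠ '#')
        ↔ pvOpen grid (qr + 1) qc :=
      ⟨fun h => ⟨by omega, h.1, hq.2.2.1, hq.2.2.2, h.2⟩, fun h => ⟨h.2.1, h.2.2.2.2⟩⟩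
    set d1 := (if d.contains (qr, qc) then d else d.insert (qr, qc) 0) with hd1def
    set d2 := (if qc + 1 < pvW grid ∧ pvCell grid qr (qc + 1) ≠ '#' then
        (d1.insert (qr, qc) (d1.getD (qr, qc) 0 + 1)).insert (qr, qc + 1)
          ((d1.insert (qr, qc) (d1.getD (qr, qc) 0 + 1)).getD (qr, qc + 1) 0 + 1)
      else d1) with hd2def
    set d3 := (if qr + 1 < (grid.length : Int) ∧ pvCell grid (qr + 1) qc ≠ '#' then
        (d2.insert (qr, qc) (d2.getD (qr, qc) 0 + 1)).insert (qr + 1, qc)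
          ((d2.insert (qr, qc) (d2.getD (qr, qc) 0 + 1)).getD (qr + 1, qc) 0 + 1)
      else d2) with hd3def
    have hSB : pvStepB grid d qr qc = d3 := by
      unfold pvStepB
      rw [if_neg hc]
    have hg1 : ∀ p', d1.get? p'
        = if p' = (qr, qc) then some (pvE grid done (qr, qc)) else d.get? p' := by
      intro p'
      by_cases hct : d.contains (qr, qc)
      · rw [hd1def, if_pos hct]
        by_cases hpq : p' = (qr, qc)
        · subst hpq
          have hM : pvM grid done (qr, qc) := by
            have h2 := pv_contains_of_inv grid done d hd (qr, qc)
            rw [hct] at h2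
            exact of_decide_eq_true h2.symm
          rw [if_pos rfl, hd (qr, qc), if_pos hM]
        · rw [if_neg hpq]
      · rw [hd1def, if_neg hct]
        by_cases hpq : p' = (qr, qc)
        · subst hpq
          have hM : ¬ pvM grid done (qr, qc) := by
            intro hM
            exact hct (by
              rw [pv_contains_of_inv grid done d hd (qr, qc)]
              exact decide_eq_true hM)
          rw [if_pos rfl, PySem.Dict.get?_insert_self, pvE_eq_zero_of_not_M grid done _ hM]
        · rw [if_neg hpq, PySem.Dict.get?_insert_of_ne _ _ hpq]
    have hgd1q : d1.getD (qr, qc) 0 = pvE grid done (qr, qc) := by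
      rw [PySem.Dict.getD_eq_get?_getD, hg1 (qr, qc), if_pos rfl]; rfl
    have hgd1 : ∀ p', p' ≠ (qr, qc) → d1.getD p' 0 = pvE grid done p' := by
      intro p' hp'
      rw [PySem.Dict.getD_eq_get?_getD, hg1 p', if_neg hp', ← PySem.Dict.getD_eq_get?_getD,
        pv_getD_of_inv grid done d hd p']
    have hg2 : ∀ p', d2.get? p'
        = if p' = (qr, qc) then
            some (pvE grid done (qr, qc) + (if pvOpen grid qr (qc + 1) then 1 else 0))
          else if p' = (qr, qc + 1) ∧ pvOpen grid qr (qc + 1) then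
            some (pvE grid done (qr, qc + 1) + 1)
          else d.get? p' := by
      intro p'
      by_cases hro : pvOpen grid qr (qc + 1)
      · rw [hd2def, if_pos (hCr.mpr hro)]
        by_cases hprq : p' = (qr, qc + 1)
        · subst hprq
          rw [PySem.Dict.get?_insert_self, if_neg hne_rq, if_pos ⟨rfl, hro⟩,
            PySem.Dict.getD_insert_of_ne _ _ _ hne_rq, hgd1 _ hne_rq]
        · have hnrq2 : ¬ (p' = (qr, qc + 1) ∧ pvOpen grid qr (qc + 1)) := fun h => hprq h.1
          rw [PySem.Dict.get?_insert_of_ne _ _ hprq]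
          by_cases hpq : p' = (qr, qc)
          · subst hpq
            rw [PySem.Dict.get?_insert_self, if_pos rfl, hgd1q, if_pos hro]
          · rw [PySem.Dict.get?_insert_of_ne _ _ hpq, hg1 p', if_neg hpq, if_neg hpq,
              if_neg hnrq2]
      · have hnro2 : ¬ (p' = (qr, qc + 1) ∧ pvOpen grid qr (qc + 1)) := fun h => hro h.2
        rw [hd2def, if_neg (fun h => hro (hCr.mp h)), hg1 p']
        by_cases hpq : p' = (qr, qc)
        · rw [if_pos hpq, if_pos hpq, if_neg hro]
          norm_num
        · rw [if_neg hpq, if_neg hpq, if_neg hnro2]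
    have hgd2q : d2.getD (qr, qc) 0
        = pvE grid done (qr, qc) + (if pvOpen grid qr (qc + 1) then 1 else 0) := by
      rw [PySem.Dict.getD_eq_get?_getD, hg2 (qr, qc), if_pos rfl]; rfl
    have hgd2d : d2.getD (qr + 1, qc) 0 = pvE grid done (qr + 1, qc) := by
      have hndq : ¬ (((qr + 1, qc) : Int × Int) = (qr, qc + 1) ∧ pvOpen grid qr (qc + 1)) :=
        fun h => hne_dr h.1
      rw [PySem.Dict.getD_eq_get?_getD, hg2 (qr + 1, qc), if_neg hne_dq, if_neg hndq,
        ← PySem.Dict.getD_eq_get?_getD, pv_getD_of_inv grid done d hd _]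
    have hg3 : ∀ p', d3.get? p'
        = if p' = (qr, qc) then
            some (pvE grid done (qr, qc) + (if pvOpen grid qr (qc + 1) then 1 else 0)
              + (if pvOpen grid (qr + 1) qc then 1 else 0))
          else if p' = (qr, qc + 1) ∧ pvOpen grid qr (qc + 1) then
            some (pvE grid done (qr, qc + 1) + 1)
          else if p' = (qr + 1, qc) ∧ pvOpen grid (qr + 1) qc then
            some (pvE grid done (qr + 1, qc) + 1)
          else d.get? p' := by
      intro p'
      by_cases hdo : pvOpen grid (qr + 1) qc
      · rw [hd3def, if_pos (hCd.mpr hdo)]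
        by_cases hpdq : p' = (qr + 1, qc)
        · subst hpdq
          have hnrq3 : ¬ (((qr + 1, qc) : Int × Int) = (qr, qc + 1) ∧ pvOpen grid qr (qc + 1)) :=
            fun h => hne_dr h.1
          rw [PySem.Dict.get?_insert_self, if_neg hne_dq, if_neg hnrq3, if_pos ⟨rfl, hdo⟩,
            PySem.Dict.getD_insert_of_ne _ _ _ hne_dq, hgd2d]
        · have hndq2 : ¬ (p' = (qr + 1, qc) ∧ pvOpen grid (qr + 1) qc) := fun h => hpdq h.1
          rw [PySem.Dict.get?_insert_of_ne _ _ hpdq]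
          by_cases hpq : p' = (qr, qc)
          · subst hpq
            rw [PySem.Dict.get?_insert_self, if_pos rfl, hgd2q, if_pos hdo]
          · rw [PySem.Dict.get?_insert_of_ne _ _ hpq, hg2 p', if_neg hpq, if_neg hpq,
              if_neg hndq2]
      · have hndo2 : ¬ (p' = (qr + 1, qc) ∧ pvOpen grid (qr + 1) qc) := fun h => hdo h.2
        rw [hd3def, if_neg (fun h => hdo (hCd.mp h)), hg2 p']
        by_cases hpq : p' = (qr, qc)
        · rw [if_pos hpq, if_pos hpq, if_neg hdo]
          norm_num
        · rw [if_neg hpq, if_neg hpq, if_neg hndo2]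
    intro p
    rw [hSB, hg3 p]
    by_cases hpq : p = (qr, qc)
    · subst hpq
      have hM' : pvM grid (done ++ [(qr, qc)]) (qr, qc) :=
        ⟨hoq, Or.inl (List.mem_append.mpr (Or.inr (by simp)))⟩
      rw [if_pos rfl, if_pos hM', pvE_snoc_self grid done qr qc hnd hoq]
      exact congrArg some (by ring)
    · rw [if_neg hpq]
      by_cases hprq : p = (qr, qc + 1) ∧ pvOpen grid qr (qc + 1)
      · obtain ⟨hpe, hro⟩ := hprq
        subst hpe
        rw [if_pos ⟨rfl, hro⟩, if_pos (pvM_snoc_right grid done qr qc hoq hro),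
          pvE_snoc_right grid done qr qc hnd hoq hro]
      · rw [if_neg hprq]
        by_cases hpdq : p = (qr + 1, qc) ∧ pvOpen grid (qr + 1) qc
        · obtain ⟨hpe, hdo⟩ := hpdq
          subst hpe
          rw [if_pos ⟨rfl, hdo⟩, if_pos (pvM_snoc_down grid done qr qc hoq hdo),
            pvE_snoc_down grid done qr qc hnd hoq hdo]
        · rw [if_neg hpdq, hd p]
          have hr : p = (qr, qc + 1) → ¬ pvOpen grid p.1 p.2 := by
            rintro rfl hop; exact hprq ⟨rfl, hop⟩
          have hdn : p = (qr + 1, qc) → ¬ pvOpen grid p.1 p.2 := by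
            rintro rfl hop; exact hpdq ⟨rfl, hop⟩
          rw [pvE_snoc_other grid done qr qc p hpq hr hdn]
          by_cases hM : pvM grid done p
          · rw [if_pos hM, if_pos ((pvM_snoc_other grid done qr qc p hpq hr hdn).mpr hM)]
          · rw [if_neg hM,
              if_neg (fun h => hM ((pvM_snoc_other grid done qr qc p hpq hr hdn).mp h))]

lemma pv_fold_inv (grid : List String) :
    ∀ (todo done : List (Int × Int)) (d : PySem.Dict (Int × Int) Int),
      (done ++ todo).Nodup → (∀ q ∈ todo, 0 ≤ q.1 ∧ q.1 < (grid.length : Int) ∧ 0 ≤ q.2 ∧ q.2 < pvW grid) →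
      pvInv grid done d →
      pvInv grid (done ++ todo) (todo.foldl (fun d p => pvStepB grid d p.1 p.2) d) := by
  intro todo
  induction todo with
  | nil => intro done d _ _ hd; simpa using hd
  | cons q t ih =>
    intro done d hnd hbox hd
    have hqd : q ∉ done := by
      have := List.disjoint_of_nodup_append hnd
      intro hmem; exact this hmem (by simp)
    have hstep := pv_step_inv grid done q.1 q.2 (hbox q (by simp)) (by simpa using hqd) d hd
    have := ih (done ++ [q]) _ (by simpa using hnd) (fun p hp => hbox p (by simp [hp]))
      (by simpa using hstep)
    simpa using this

lemma pv_deg_final (grid : List String) (p : Int × Int) :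
    ((PySem.List.pyRange 0 (grid.length : Int) 1).foldl
      (fun d r =>
        (PySem.List.pyRange 0 (pvW grid) 1).foldl (fun d c => pvStepB grid d r c) d)
      PySem.Dict.empty).get? p
    = if pvM grid (pvCells grid) p then some (pvE grid (pvCells grid) p) else none := by
  have hflat := pv_foldl_foldl (σ := PySem.Dict (Int × Int) Int)
    (PySem.List.pyRange 0 (grid.length : Int) 1) (PySem.List.pyRange 0 (pvW grid) 1)
    (fun d r c => pvStepB grid d r c) PySem.Dict.empty
  rw [hflat]
  have := pv_fold_inv grid (pvCells grid) [] PySem.Dict.empty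
    (by simpa using pv_nodup_pvCells grid)
    (fun q hq => (pv_mem_pvCells grid q.1 q.2).mp hq)
    (by intro p; simp [pvM])
  simpa [pvCells] using this p

-- A's neighbour count
set_option maxHeartbeats 1600000 in
lemma pv_len_neighbours (grid : List String) (r c : Int) :
    ((get_neighbours grid (r, c) none).length : Int) = pvN grid r c := by
  unfold get_neighbours pvN pvOpen
  simp only [List.foldl_cons, List.foldl_nil, eq_self_iff_true, or_true, if_true]
  split_ifs <;> simp

-- final degree = A's neighbour count, for open cells
lemma pv_E_cells (grid : List String) (r c : Int) (ho : pvOpen grid r c) :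
    pvE grid (pvCells grid) (r, c) = pvN grid r c := by
  have hbox : (r, c) ∈ pvCells grid := (pv_mem_pvCells grid r c).mpr ⟨ho.1, ho.2.1, ho.2.2.1, ho.2.2.2.1⟩
  unfold pvE pvN
  have hl : ((r, c - 1) ∈ pvCells grid ∧ pvOpen grid r (c - 1) ∧ pvOpen grid r c) ↔ pvOpen grid r (c - 1) := by
    constructor
    · tauto
    · intro h; exact ⟨(pv_mem_pvCells grid r (c - 1)).mpr ⟨h.1, h.2.1, h.2.2.1, h.2.2.2.1⟩, h, ho⟩
  have hu : ((r - 1, c) ∈ pvCells grid ∧ pvOpen grid (r - 1) c ∧ pvOpen grid r c) ↔ pvOpen grid (r - 1) c := by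
    constructor
    · tauto
    · intro h; exact ⟨(pv_mem_pvCells grid (r - 1) c).mpr ⟨h.1, h.2.1, h.2.2.1, h.2.2.2.1⟩, h, ho⟩
  rw [if_pos (show (r, c) ∈ pvCells grid ∧ pvOpen grid r c from ⟨hbox, ho⟩)]
  simp only [hl, hu]
  split_ifs <;> norm_num

-- ===== VERDICT (by name: the statement is the Claim_ definition above) =====
theorem find_junctions_and_deadends_spec : Claim_equal_find_junctions_and_deadends := by
  intro grid _ _
  unfold Spec_find_junctions_and_deadends
  simp only [find_junctions_and_deadends, find_junctions_and_deadends_alt]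
  apply PySem.List.foldl_congr_mem
  intro acc row hrow
  apply PySem.List.foldl_congr_mem
  intro acc2 col hcol
  rw [PySem.List.mem_pyRange_one] at hrow hcol
  by_cases hc : pvCell grid row col = '#'
  · rw [if_pos hc]
    have hM : ¬ pvM grid (pvCells grid) (row, col) := fun h => h.1.2.2.2.2 hc
    rw [pv_deg_final grid (row, col), if_neg hM]
  · rw [if_neg hc]
    have hop : pvOpen grid row col := ⟨hrow.1, hrow.2, hcol.1, hcol.2, hc⟩
    have hM : pvM grid (pvCells grid) (row, col) :=
      ⟨hop, Or.inl ((pv_mem_pvCells grid row col).mpr ⟨hrow.1, hrow.2, hcol.1, hcol.2⟩)⟩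
    rw [pv_deg_final grid (row, col), if_pos hM, pv_E_cells grid row col hop]
    have hlen := pv_len_neighbours grid row col
    by_cases h0 : (get_neighbours grid (row, col) none).length = 0
    · have hN0 : pvN grid row col = 0 := by rw [← hlen, h0]; rfl
      rw [if_pos h0]
      simp [hN0]
    · rw [if_neg h0]
      have hN0 : ¬ pvN grid row col = 0 := by rw [← hlen]; exact_mod_cast h0
      by_cases h1 : (get_neighbours grid (row, col) none).length > 1
      · have hN1 : pvN grid row col > 1 := by rw [← hlen]; exact_mod_cast h1
        rw [if_pos h1]
        simp [hN0, hN1]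
      · have hN1 : ¬ pvN grid row col > 1 := by rw [← hlen]; exact_mod_cast h1
        rw [if_neg h1]
        simp [hN0, hN1]
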